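-- pv_equiv track=rewrite | github.com/farodoc/Algorithms-and-Data-Structures-AGH-UST | Random tasks/Even more random/2.py | czyMoznaWstawic
-- ===== SOURCE A (Python) =====
-- def czyMoznaWstawic(t):
--     n = len(t)
--     flagW = True
--     flagK = True
--     for w in range(n):
--         for k in range(n):
--             if t[w][k] == 0:
--                 if flagW and flagK:
--                     wiersz = w
--                     flagW = False
--
--                 elif not flagW and flagK:
--                     if w != wiersz:
--                         kolumna = k
--                         flagK = False
--
--                 else:
--                     if w != wiersz and k != kolumna:
--                         return False
--
--     return True
-- ===== SOURCE B (Python) =====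
-- def czyMoznaWstawic(t):
--     n = len(t)
--     zeros = [(w, k) for w in range(n) for k in range(n) if t[w][k] == 0]
--     if not zeros:
--         return True
--     wiersz = zeros[0][0]
--     kolumna = None
--     for (w, k) in zeros:
--         if w != wiersz:
--             kolumna = k
--             break
--     if kolumna is None:
--         return True
--     return all(w == wiersz or k == kolumna for (w, k) in zeros)
-- ===== Notes on version B (the rewrite author's own statement) =====
-- stated objective: simpler
-- what changed: Replaces A's interleaved four-variable flag state machine with a gather-then-verify decomposition: collect all zero positions in one comprehension, read the row from the first zero and the column from the first off-row zero, then verify every zero with a single uniform check.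
import Mathlib
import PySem

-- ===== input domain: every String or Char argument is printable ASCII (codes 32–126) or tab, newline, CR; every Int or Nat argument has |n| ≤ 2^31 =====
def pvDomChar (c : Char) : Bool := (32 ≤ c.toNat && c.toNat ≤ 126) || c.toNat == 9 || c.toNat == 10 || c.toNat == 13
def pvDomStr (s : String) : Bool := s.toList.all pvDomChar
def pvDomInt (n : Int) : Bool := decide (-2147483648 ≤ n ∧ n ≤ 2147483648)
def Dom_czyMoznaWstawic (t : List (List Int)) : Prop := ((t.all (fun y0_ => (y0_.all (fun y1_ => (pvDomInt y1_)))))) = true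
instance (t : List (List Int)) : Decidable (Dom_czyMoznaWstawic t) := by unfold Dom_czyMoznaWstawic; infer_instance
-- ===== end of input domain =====

-- B replaces A's interleaved flag state machine by a gather-then-verify decomposition
-- (collect the zero positions, derive the row and the column, then one uniform check).

-- ===== PORT A =====
-- state = (flagW, flagK, wiersz, kolumna); Python leaves wiersz/kolumna unbound until set,
-- but never reads them before the flags say they are set, so 0 is a harmless placeholder.
-- t[w][k] via pyGetD: in range whenever Pre_ holds (Python raises IndexError on ragged rows).
def pvAStep (t : List (List Int)) (st : Option (Bool × Bool × Int × Int)) (wk : Int × Int) :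
    Option (Bool × Bool × Int × Int) :=
  match st with
  | none => none                         -- already returned False
  | some (flagW, flagK, wiersz, kolumna) =>
    if PySem.List.pyGetD (PySem.List.pyGetD t wk.1 []) wk.2 1 = 0 then
      if flagW && flagK then some (false, flagK, wk.1, kolumna)
      else if !flagW && flagK then
        if wk.1 ≠ wiersz then some (flagW, false, wiersz, wk.2) else st
      else
        if wk.1 ≠ wiersz ∧ wk.2 ≠ kolumna then none else st
    else st

def czyMoznaWstawic (t : List (List Int)) : Bool :=
  let n : Int := t.length
  let cells := (PySem.List.pyRange 0 n 1).flatMap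
      (fun w => (PySem.List.pyRange 0 n 1).map (fun k => (w, k)))
  (cells.foldl (pvAStep t) (some (true, true, 0, 0))).isSome

-- ===== PORT B =====
def pvZeros (t : List (List Int)) : List (Int × Int) :=
  let n : Int := t.length
  (PySem.List.pyRange 0 n 1).flatMap
    (fun w => ((PySem.List.pyRange 0 n 1).filter
        (fun k => PySem.List.pyGetD (PySem.List.pyGetD t w []) k 1 == 0)).map (fun k => (w, k)))

def czyMoznaWstawic_alt (t : List (List Int)) : Bool :=
  let zeros := pvZeros t
  match zeros with
  | [] => true
  | (w0, _) :: _ =>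
    match zeros.find? (fun z => z.1 != w0) with
    | none => true
    | some z1 => zeros.all (fun z => z.1 == w0 || z.2 == z1.2)

-- ===== PRECONDITION & SPEC =====
-- Pre_ excludes exactly the ragged inputs: some row shorter than len(t), where the
-- Python A (and B alike) raises IndexError on t[w][k].
def Pre_czyMoznaWstawic (t : List (List Int)) : Prop :=
  ∀ row ∈ t, t.length ≤ row.length
instance (t : List (List Int)) : Decidable (Pre_czyMoznaWstawic t) := by
  unfold Pre_czyMoznaWstawic; infer_instance

def pvWitness_czyMoznaWstawic : List (List Int) := [[1, 0], [0, 1]]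

def Spec_czyMoznaWstawic (t : List (List Int)) (out : Bool) : Prop := out = czyMoznaWstawic_alt t
instance (t : List (List Int)) (out : Bool) : Decidable (Spec_czyMoznaWstawic t out) := by
  unfold Spec_czyMoznaWstawic; infer_instance

-- ===== CLAIM (what is proved, stated in full; the proofs are below) =====
def Claim_equal_czyMoznaWstawic : Prop :=
  ∀ (t : List (List Int)), Dom_czyMoznaWstawic t → Pre_czyMoznaWstawic t →
    Spec_czyMoznaWstawic t (czyMoznaWstawic t)

-- ===== LEMMAS AND PROOFS =====

-- A's step ignores non-zero cells, so its fold over all cells is the fold of the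
-- pure state machine over the filtered zero cells.
theorem pv_foldl_filter {α σ : Type} (p : α → Bool) (f : σ → α → σ)
    (g : σ → α → σ) (hfg : ∀ s a, f s a = if p a then g s a else s) :
    ∀ (l : List α) (s : σ), l.foldl f s = (l.filter p).foldl g s := by
  intro l
  induction l with
  | nil => intro s; rfl
  | cons a l ih =>
    intro s
    by_cases h : p a = true <;> simp [h, hfg, ih]

-- the machine step on a zero cell (value test already done)
def pvMStep (st : Option (Bool × Bool × Int × Int)) (z : Int × Int) :
    Option (Bool × Bool × Int × Int) :=
  match st with
  | none => none
  | some (flagW, flagK, wiersz, kolumna) =>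
    if flagW && flagK then some (false, flagK, z.1, kolumna)
    else if !flagW && flagK then
      if z.1 ≠ wiersz then some (flagW, false, wiersz, z.2) else st
    else
      if z.1 ≠ wiersz ∧ z.2 ≠ kolumna then none else st

theorem pv_phase2 (w0 kol : Int) :
    ∀ (l : List (Int × Int)),
      (l.foldl pvMStep (some (false, false, w0, kol))).isSome =
        l.all (fun z => z.1 == w0 || z.2 == kol) := by
  intro l
  induction l with
  | nil => rfl
  | cons z l ih =>
    by_cases hw : z.1 = w0
    · simp [List.foldl_cons, pvMStep, hw, ih]
    · by_cases hk : z.2 = kol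
      · simp [List.foldl_cons, pvMStep, hw, hk, ih]
      · have hnone : ∀ (l' : List (Int × Int)),
            (l'.foldl pvMStep (none : Option (Bool × Bool × Int × Int))) = none := by
          intro l'; induction l' with
          | nil => rfl
          | cons a l' ih' => simpa [List.foldl_cons, pvMStep] using ih'
        simp [List.foldl_cons, pvMStep, hw, hk, hnone]

theorem pv_phase1 (w0 k0 : Int) :
    ∀ (l : List (Int × Int)),
      (l.foldl pvMStep (some (false, true, w0, k0))).isSome =
        (match l.find? (fun z => z.1 != w0) with
         | none => true
         | some z1 => l.all (fun z => z.1 == w0 || z.2 == z1.2)) := by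
  intro l
  induction l with
  | nil => rfl
  | cons z l ih =>
    by_cases hw : z.1 = w0
    · simp [List.foldl_cons, pvMStep, hw, ih]
    · simp [List.foldl_cons, pvMStep, hw, pv_phase2, List.all_cons]

theorem pv_machine (zs : List (Int × Int)) :
    (zs.foldl pvMStep (some (true, true, 0, 0))).isSome =
      (match zs with
       | [] => true
       | (w0, _) :: _ =>
         match zs.find? (fun z => z.1 != w0) with
         | none => true
         | some z1 => zs.all (fun z => z.1 == w0 || z.2 == z1.2)) := by
  cases zs with
  | nil => rfl
  | cons z rest =>
    obtain ⟨w0, k0⟩ := z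
    simp only [List.foldl_cons, pvMStep, if_pos (by simp : (true && true) = true)]
    rw [pv_phase1]
    simp [List.all_cons]

-- zeros list = filter of the full cell list
theorem pv_zeros_eq_filter (t : List (List Int)) :
    pvZeros t =
      ((PySem.List.pyRange 0 (t.length : Int) 1).flatMap
          (fun w => (PySem.List.pyRange 0 (t.length : Int) 1).map (fun k => (w, k)))).filter
        (fun z => PySem.List.pyGetD (PySem.List.pyGetD t z.1 []) z.2 1 == 0) := by
  simp only [pvZeros, List.filter_flatMap, List.filter_map]
  rfl

-- ===== VERDICT (by name: the statement is the Claim_ definition above) =====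
theorem czyMoznaWstawic_spec : Claim_equal_czyMoznaWstawic := by
  intro t _ _
  unfold Spec_czyMoznaWstawic czyMoznaWstawic czyMoznaWstawic_alt
  dsimp only
  rw [pv_foldl_filter (fun z => PySem.List.pyGetD (PySem.List.pyGetD t z.1 []) z.2 1 == 0)
        (pvAStep t) pvMStep
        (by intro s z; cases s with
            | none => simp [pvAStep, pvMStep]
            | some st =>
              by_cases h : PySem.List.pyGetD (PySem.List.pyGetD t z.1 []) z.2 1 = 0 <;>
                simp [pvAStep, pvMStep, h])]
  rw [← pv_zeros_eq_filter, pv_machine]
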